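-- pv_equiv track=rewrite | github.com/subrotonpi/clone_evaluation | data/gptcb_cross/gptcb_cross/None/1683.py | solution
-- ===== SOURCE A (Python) =====
-- def solution(x, a):
--     count = [0] * x
--     for i in range(len(a)):
--         try:
--             count[a[i] - 1] += 1
--         except:
--             continue
--         if i >= x - 1:
--             for j in range(len(count)):
--                 if count[j] == 0:
--                     break
--                 if j == len(count) - 1:
--                     return i
--     return -1
-- ===== SOURCE B (Python) =====
-- def solution(x, a):
--     # Single pass: collect the distinct values from 1..x seen so far and return
--     # the index at which all x of them have appeared.
--     seen = set()
--     for i, v in enumerate(a):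
--         if 1 <= v <= x:
--             seen.add(v)
--             if len(seen) == x:
--                 return i
--     return -1
-- ===== Notes on version B (the rewrite author's own statement) =====
-- stated objective: faster
-- what changed: B drops A's count array and its full rescan after every element: a single pass collects the distinct values from 1..x into a set and returns the first index at which the set reaches size x.
-- intended difference: On inputs with x>0 whose earliest prefix covering positions 1..x under A's accidental negative-index rule (a value v with 1-x<=v<=0 silently counts as position v+x via count[v-1]) is not a genuine cover of 1..x, A returns that too-early index while B returns the first index where 1..x are all genuinely covered (or -1); B's is intended because a value outside 1..x covers no position. — e.g. on solution(2, [1, 0]): A returns 1, B returns -1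
import Mathlib
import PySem

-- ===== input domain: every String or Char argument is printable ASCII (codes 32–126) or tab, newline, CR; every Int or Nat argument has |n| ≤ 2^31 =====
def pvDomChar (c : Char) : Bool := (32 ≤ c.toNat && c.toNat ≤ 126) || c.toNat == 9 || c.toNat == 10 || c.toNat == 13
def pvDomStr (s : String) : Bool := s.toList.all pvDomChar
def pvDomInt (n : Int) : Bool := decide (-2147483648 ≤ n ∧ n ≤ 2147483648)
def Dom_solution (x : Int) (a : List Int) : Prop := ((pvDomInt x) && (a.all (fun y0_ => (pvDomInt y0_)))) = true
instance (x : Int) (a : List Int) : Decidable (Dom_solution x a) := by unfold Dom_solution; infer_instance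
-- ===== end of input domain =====

-- B replaces A's count array and its full rescan after every element (objective: faster)
-- by a single pass collecting the distinct values from 1..x into a set.

-- ===== PORT A =====
-- The Python array count = [0]*x (length x throughout: item assignment never resizes) is
-- modeled by its length x.toNat together with an index function Nat → Int; count[a[i]-1]
-- uses PySem.List.pyIdx? for Python's exact index rule (negative wraparound, IndexError = none),
-- and count[k] += 1 is the pointwise update of the function — step for step the same algorithm.
-- inner loop 'for j in range(len(count)): if count[j]==0: break; if j==len(count)-1: return i';
-- the fuel argument (= len(count) - j) only makes the index recursion structural.
def pyInner (n : Nat) (count : Nat → Int) : Nat → Nat → Bool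
  | _, 0 => false
  | j, fuel + 1 =>
    if j < n then
      if count j = 0 then false
      else if j = n - 1 then true
      else pyInner n count (j + 1) fuel
    else false

-- outer loop 'for i in range(len(a))', state = count; 'try count[a[i]-1] += 1 except: continue'
def pyOuter (x : Int) : List Int → Nat → (Nat → Int) → Int
  | [], _, _ => -1
  | v :: rest, i, count =>
    match PySem.List.pyIdx? x.toNat (v - 1) with
    | none => pyOuter x rest (i + 1) count
    | some k =>
      let count' := fun j => if j = k then count k + 1 else count j
      if (i : Int) ≥ x - 1 then
        if pyInner x.toNat count' 0 x.toNat then (i : Int) else pyOuter x rest (i + 1) count'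
      else pyOuter x rest (i + 1) count'

def solution (x : Int) (a : List Int) : Int :=
  pyOuter x a 0 (fun _ => 0)

-- ===== PORT B =====
-- single pass: 'if 1 <= v <= x: seen.add(v); if len(seen) == x: return i'
def altGo (x : Int) : List Int → Nat → PySem.Set Int → Int
  | [], _, _ => -1
  | v :: rest, i, seen =>
    if 1 ≤ v ∧ v ≤ x then
      let seen' := PySem.Set.add seen v
      if (seen'.length : Int) = x then (i : Int)
      else altGo x rest (i + 1) seen'
    else altGo x rest (i + 1) seen

def solution_alt (x : Int) (a : List Int) : Int :=
  altGo x a 0 PySem.Set.empty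

-- ===== PRECONDITION & SPEC =====
-- wcovB: prefix l covers every position 1..x under A's rule (count[v-1] with Python
-- negative indexing: v itself, or the negative alias v = p - x).  tcovB: genuine cover by 1..x.
-- (each value covers at most one position, so a cover needs x ≤ length; the guard only
-- short-circuits the scan and is part of the stated predicate)
def wcovB (x : Int) (l : List Int) : Bool :=
  decide (x ≤ (l.length : Int)) &&
    (List.range x.toNat).all (fun p => decide (((p : Int) + 1) ∈ l) || decide (((p : Int) + 1 - x) ∈ l))
def tcovB (x : Int) (l : List Int) : Bool :=
  decide (x ≤ (l.length : Int)) &&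
    (List.range x.toNat).all (fun p => decide (((p : Int) + 1) ∈ l))

-- On inputs with x>0 whose earliest prefix covering 1..x under A's accidental negative-index
-- rule (a value v with 1-x ≤ v ≤ 0 silently counts as position v+x via count[v-1]) is not a
-- genuine cover of 1..x, A returns that too-early index while B returns the first index where
-- 1..x are all genuinely covered (or -1); B's is intended because a value outside 1..x covers
-- no position.
def D_solution (x : Int) (a : List Int) : Prop :=
  0 < x ∧ ∃ i : Nat, i < a.length ∧ (∀ j : Nat, j < i → ¬ wcovB x (a.take (j + 1)) = true) ∧
    wcovB x (a.take (i + 1)) = true ∧ ¬ tcovB x (a.take (i + 1)) = true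
instance (x : Int) (a : List Int) : Decidable (D_solution x a) := by unfold D_solution; infer_instance

def Spec_solution (x : Int) (a : List Int) (out : Int) : Prop := ¬ D_solution x a → out = solution_alt x a
instance (x : Int) (a : List Int) (out : Int) : Decidable (Spec_solution x a out) := by unfold Spec_solution; infer_instance

def pvDiffWitness_solution : Int × List Int := (2, [1, 0])
def pvDiffWitnessOut_solution : Int × Int := (1, -1)

-- ===== CLAIM (what is proved, stated in full; the proofs are below) =====
def Claim_unchanged_solution : Prop := ∀ (x : Int) (a : List Int), Dom_solution x a → Spec_solution x a (solution x a)
def Claim_changed_solution : Prop := Dom_solution (pvDiffWitness_solution.1) (pvDiffWitness_solution.2) ∧ D_solution (pvDiffWitness_solution.1) (pvDiffWitness_solution.2) ∧ solution (pvDiffWitness_solution.1) (pvDiffWitness_solution.2) = pvDiffWitnessOut_solution.1 ∧ solution_alt (pvDiffWitness_solution.1) (pvDiffWitness_solution.2) = pvDiffWitnessOut_solution.2 ∧ pvDiffWitnessOut_solution.1 ≠ pvDiffWitnessOut_solution.2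
def Claim_exact_solution : Prop := ∀ (x : Int) (a : List Int), Dom_solution x a → D_solution x a → solution x a ≠ solution_alt x a

-- ===== LEMMAS AND PROOFS =====

-- A's inner loop from j (with enough fuel) returns true iff it runs and meets no zero
lemma pyInner_iff (n : Nat) (count : Nat → Int) : ∀ (fuel j : Nat), n ≤ j + fuel →
    (pyInner n count j fuel = true ↔
      j < n ∧ ∀ p, j ≤ p → p < n → count p ≠ 0) := by
  intro fuel
  induction fuel with
  | zero =>
    intro j hle
    simp only [pyInner, Bool.false_eq_true, false_iff]
    intro ⟨h1, _⟩; omega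
  | succ fuel ih =>
    intro j hle
    simp only [pyInner]
    by_cases h : j < n
    · rw [if_pos h]
      by_cases hz : count j = 0
      · rw [if_pos hz]
        simp only [Bool.false_eq_true, false_iff]
        intro ⟨_, hall⟩; exact hall j le_rfl h hz
      · rw [if_neg hz]
        by_cases hlast : j = n - 1
        · rw [if_pos hlast]
          simp only [true_iff]
          refine ⟨h, fun p hjp hp => ?_⟩
          have : p = j := by omega
          subst this; exact hz
        · rw [if_neg hlast, ih (j + 1) (by omega)]
          constructor
          · rintro ⟨_, hall⟩
            refine ⟨h, fun p hjp hp => ?_⟩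
            rcases Nat.eq_or_lt_of_le hjp with rfl | hlt
            · exact hz
            · exact hall p hlt hp
          · rintro ⟨_, hall⟩
            exact ⟨by omega, fun p hjp hp => hall p (by omega) hp⟩
    · rw [if_neg h]
      simp only [Bool.false_eq_true, false_iff]
      intro ⟨h1, _⟩; exact h h1

-- bridges for the Bool coverage predicates
lemma wcovB_iff (x : Int) (l : List Int) :
    wcovB x l = true ↔ x ≤ (l.length : Int) ∧
      ∀ p : Nat, p < x.toNat → (((p : Int) + 1) ∈ l ∨ ((p : Int) + 1 - x) ∈ l) := by
  simp [wcovB, List.all_eq_true, List.mem_range]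

lemma tcovB_iff (x : Int) (l : List Int) :
    tcovB x l = true ↔ x ≤ (l.length : Int) ∧ ∀ p : Nat, p < x.toNat → (((p : Int) + 1) ∈ l) := by
  simp [tcovB, List.all_eq_true, List.mem_range]

lemma tcov_imp_wcov (x : Int) (l : List Int) (h : tcovB x l = true) : wcovB x l = true := by
  rw [wcovB_iff]; rw [tcovB_iff] at h
  exact ⟨h.1, fun p hp => Or.inl (h.2 p hp)⟩

-- a nodup list of integers from [lo, lo+x) has length x iff it contains each of them
lemma covered_iff (x lo : Int) (hx : 0 < x) (s : List Int) (hnd : s.Nodup)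
    (hrange : ∀ e ∈ s, lo ≤ e ∧ e < lo + x) :
    (s.length : Int) = x ↔ ∀ p : Nat, p < x.toNat → (lo + (p : Int)) ∈ s := by
  have hsub : s.toFinset ⊆ Finset.Ico lo (lo + x) := by
    intro e he
    rw [List.mem_toFinset] at he
    rcases hrange e he with ⟨h0, h1⟩
    simp [Finset.mem_Ico, h0, h1]
  have hcard : s.toFinset.card = s.length := List.toFinset_card_of_nodup hnd
  have hicard : (Finset.Ico lo (lo + x)).card = x.toNat := by
    rw [Int.card_Ico]; omega
  constructor
  · intro hlen p hp
    have heq : s.toFinset = Finset.Ico lo (lo + x) :=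
      Finset.eq_of_subset_of_card_le hsub (by omega)
    have hmem : lo + (p : Int) ∈ Finset.Ico lo (lo + x) := by
      simp [Finset.mem_Ico]; omega
    rw [← heq, List.mem_toFinset] at hmem; exact hmem
  · intro hall
    have hsup : Finset.Ico lo (lo + x) ⊆ s.toFinset := by
      intro e he
      rw [Finset.mem_Ico] at he
      have hm := hall (e - lo).toNat (by omega)
      rw [List.mem_toFinset]
      have he' : lo + ((e - lo).toNat : Int) = e := by omega
      rwa [he'] at hm
    have heq : s.toFinset = Finset.Ico lo (lo + x) :=
      Finset.Subset.antisymm hsub hsup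
    have := congrArg Finset.card heq
    omega

-- the wrap-aware single-pass loop A is first reduced to (old proof-level helper)
def wrapGo (x : Int) : List Int → Nat → PySem.Set Int → Int
  | [], _, _ => -1
  | v :: rest, i, seen =>
    if 1 - x ≤ v ∧ v ≤ x then
      let seen' := PySem.Set.add seen (PySem.Int.mod (v - 1) x)
      if (i : Int) ≥ x - 1 ∧ (seen'.length : Int) = x then (i : Int)
      else wrapGo x rest (i + 1) seen'
    else wrapGo x rest (i + 1) seen

-- main simulation: count p ≠ 0 exactly for positions p in seen
lemma go_eq (x : Int) (rest : List Int) : ∀ (i : Nat) (count : Nat → Int) (seen : PySem.Set Int),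
    seen.Nodup →
    (∀ e ∈ seen, 0 ≤ e ∧ e < x) →
    (∀ p, p < x.toNat → 0 ≤ count p) →
    (∀ p, p < x.toNat → (count p ≠ 0 ↔ (p : Int) ∈ seen)) →
    pyOuter x rest i count = wrapGo x rest i seen := by
  induction rest with
  | nil => intro i count seen _ _ _ _; rfl
  | cons v rest ih =>
    intro i count seen hnd hrange hpos hiff
    by_cases hval : 1 - x ≤ v ∧ v ≤ x
    · -- valid index
      have hx : 0 < x := by omega
      set m := PySem.Int.mod (v - 1) x with hmdef
      have hm0 : 0 ≤ m := PySem.Int.mod_nonneg _ hx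
      have hm1 : m < x := PySem.Int.mod_lt _ hx
      have hmval : (0 ≤ v - 1 ∧ m = v - 1) ∨ (v - 1 < 0 ∧ m = v - 1 + x) := by
        by_cases h0 : 0 ≤ v - 1
        · left
          refine ⟨h0, ?_⟩
          rw [hmdef, PySem.Int.mod_eq_emod_of_pos hx]
          exact Int.emod_eq_of_lt h0 (by omega)
        · right
          refine ⟨by omega, ?_⟩
          rw [hmdef, PySem.Int.mod_eq_emod_of_pos hx, ← Int.add_emod_right]
          exact Int.emod_eq_of_lt (by omega) (by omega)
      have hplt : m.toNat < x.toNat := by omega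
      have hidx : PySem.List.pyIdx? x.toNat (v - 1) = some m.toNat := by
        rcases hmval with ⟨h0, hmv⟩ | ⟨h0, hmv⟩ <;>
          (simp only [PySem.List.pyIdx?]
           split_ifs <;> first
             | (simp only [Option.some.injEq]; omega)
             | omega)
      set c' : Nat → Int := fun j => if j = m.toNat then count m.toNat + 1 else count j with hc'
      set s' := PySem.Set.add seen m with hs'
      have hnd' : s'.Nodup := PySem.Set.nodup_add _ _ hnd
      have hrange' : ∀ e ∈ s', 0 ≤ e ∧ e < x := by
        intro e he
        rw [hs', PySem.Set.mem_add] at he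
        rcases he with he | rfl
        · exact hrange e he
        · exact ⟨hm0, hm1⟩
      have hpos' : ∀ p, p < x.toNat → 0 ≤ c' p := by
        intro p h
        simp only [hc']
        split_ifs with he
        · have := hpos m.toNat hplt; omega
        · exact hpos p h
      have hiff' : ∀ p, p < x.toNat → (c' p ≠ 0 ↔ (p : Int) ∈ s') := by
        intro p h
        simp only [hc', hs']
        split_ifs with he
        · subst he
          have := hpos m.toNat hplt
          simp only [PySem.Set.mem_add]
          constructor
          · intro _; right; omega
          · intro _; omega
        · rw [hiff p h, PySem.Set.mem_add]
          constructor
          · intro hmem; left; exact hmem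
          · rintro (hmem | hpm)
            · exact hmem
            · exfalso; apply he; omega
      have hrec : pyOuter x rest (i + 1) c' = wrapGo x rest (i + 1) s' :=
        ih (i + 1) c' s' hnd' hrange' hpos' hiff'
      have hfull : pyInner x.toNat c' 0 x.toNat = true ↔ (s'.length : Int) = x := by
        rw [pyInner_iff x.toNat c' x.toNat 0 (by omega),
            covered_iff x 0 hx s' hnd' (by simpa using hrange')]
        constructor
        · rintro ⟨_, hall⟩ p hp
          have hpc : p < x.toNat := by omega
          have := (hiff' p hpc).mp (hall p (Nat.zero_le _) hpc)
          simpa using this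
        · intro hall
          refine ⟨by omega, fun p _ hp => ?_⟩
          rw [hiff' p hp]
          have := hall p (by omega)
          simpa using this
      show (match PySem.List.pyIdx? x.toNat (v - 1) with
            | none => pyOuter x rest (i + 1) count
            | some k =>
              let count' := fun j => if j = k then count k + 1 else count j
              if (i : Int) ≥ x - 1 then
                if pyInner x.toNat count' 0 x.toNat then (i : Int) else pyOuter x rest (i + 1) count'
              else pyOuter x rest (i + 1) count') = _
      rw [hidx]
      show (if (i : Int) ≥ x - 1 then
              if pyInner x.toNat c' 0 x.toNat then (i : Int) else pyOuter x rest (i + 1) c'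
            else pyOuter x rest (i + 1) c') = _
      simp only [wrapGo, if_pos hval]
      rw [← hmdef, ← hs']
      by_cases hi : (i : Int) ≥ x - 1
      · rw [if_pos hi]
        by_cases hfl : pyInner x.toNat c' 0 x.toNat = true
        · rw [if_pos hfl, if_pos ⟨hi, hfull.mp hfl⟩]
        · rw [if_neg hfl, if_neg (by intro ⟨_, h2⟩; exact hfl (hfull.mpr h2)), hrec]
      · rw [if_neg hi, if_neg (by intro ⟨h1, _⟩; exact hi h1), hrec]
    · -- invalid index: A raises IndexError and continues, the wrap loop skips the element
      have hnone : PySem.List.pyIdx? x.toNat (v - 1) = none := by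
        simp only [PySem.List.pyIdx?]
        split_ifs <;> first | rfl | omega
      show (match PySem.List.pyIdx? x.toNat (v - 1) with
            | none => pyOuter x rest (i + 1) count
            | some k =>
              let count' := fun j => if j = k then count k + 1 else count j
              if (i : Int) ≥ x - 1 then
                if pyInner x.toNat count' 0 x.toNat then (i : Int) else pyOuter x rest (i + 1) count'
              else pyOuter x rest (i + 1) count') = _
      rw [hnone]
      simp only [wrapGo, if_neg hval]
      exact ih (i + 1) count seen hnd hrange hpos hiff

-- the generic 'first index whose one-longer prefix satisfies full' loop
def firstIdx (full : List Int → Bool) (pre : List Int) : List Int → Int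
  | [] => -1
  | v :: rest => if full (pre ++ [v]) then (pre.length : Int) else firstIdx full (pre ++ [v]) rest

lemma wrapGo_eq_firstIdx (x : Int) (hx : 0 < x) : ∀ (rest pre : List Int) (seen : PySem.Set Int),
    seen.Nodup →
    (∀ e : Int, e ∈ seen ↔ 0 ≤ e ∧ e < x ∧ ((e + 1) ∈ pre ∨ (e + 1 - x) ∈ pre)) →
    seen.length ≤ pre.length →
    (seen.length : Int) ≠ x →
    wrapGo x rest pre.length seen = firstIdx (wcovB x) pre rest := by
  intro rest
  induction rest with
  | nil => intro pre seen _ _ _ _; rfl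
  | cons v rest ih =>
    intro pre seen hnd hchar hle hne
    have hrange : ∀ e ∈ seen, 0 ≤ e ∧ e < 0 + x := by
      intro e he
      obtain ⟨h1, h2, _⟩ := (hchar e).mp he
      exact ⟨h1, by omega⟩
    by_cases hval : 1 - x ≤ v ∧ v ≤ x
    · set m := PySem.Int.mod (v - 1) x with hmdef
      have hm0 : 0 ≤ m := PySem.Int.mod_nonneg _ hx
      have hm1 : m < x := PySem.Int.mod_lt _ hx
      have hmval : (1 ≤ v ∧ m = v - 1) ∨ (v ≤ 0 ∧ m = v - 1 + x) := by
        by_cases h0 : 0 ≤ v - 1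
        · left
          refine ⟨by omega, ?_⟩
          rw [hmdef, PySem.Int.mod_eq_emod_of_pos hx]
          exact Int.emod_eq_of_lt h0 (by omega)
        · right
          refine ⟨by omega, ?_⟩
          rw [hmdef, PySem.Int.mod_eq_emod_of_pos hx, ← Int.add_emod_right]
          exact Int.emod_eq_of_lt (by omega) (by omega)
      set s' := PySem.Set.add seen m with hs'
      have hnd' : s'.Nodup := PySem.Set.nodup_add _ _ hnd
      have hlen' : s'.length ≤ seen.length + 1 := by
        rw [hs']; unfold PySem.Set.add; split_ifs <;> simp
      have hchar' : ∀ e : Int, e ∈ s' ↔ 0 ≤ e ∧ e < x ∧ ((e + 1) ∈ pre ++ [v] ∨ (e + 1 - x) ∈ pre ++ [v]) := by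
        intro e
        rw [hs', PySem.Set.mem_add, hchar e]
        simp only [List.mem_append, List.mem_singleton]
        constructor
        · rintro (⟨h1, h2, h3 | h3⟩ | rfl)
          · exact ⟨h1, h2, Or.inl (Or.inl h3)⟩
          · exact ⟨h1, h2, Or.inr (Or.inl h3)⟩
          · rcases hmval with ⟨hv, hm⟩ | ⟨hv, hm⟩
            · exact ⟨hm0, hm1, Or.inl (Or.inr (by omega))⟩
            · exact ⟨hm0, hm1, Or.inr (Or.inr (by omega))⟩
        · rintro ⟨h1, h2, (h3 | h3) | (h3 | h3)⟩
          · exact Or.inl ⟨h1, h2, Or.inl h3⟩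
          · right; rcases hmval with ⟨hv, hm⟩ | ⟨hv, hm⟩ <;> omega
          · exact Or.inl ⟨h1, h2, Or.inr h3⟩
          · right; rcases hmval with ⟨hv, hm⟩ | ⟨hv, hm⟩ <;> omega
      have hrange' : ∀ e ∈ s', 0 ≤ e ∧ e < 0 + x := by
        intro e he
        obtain ⟨h1, h2, _⟩ := (hchar' e).mp he
        exact ⟨h1, by omega⟩
      have hlb : seen.length ≤ s'.length := by
        rw [hs']; unfold PySem.Set.add; split_ifs <;> simp
      have hflen := covered_iff x 0 hx s' hnd' hrange'
      have hfull : (s'.length : Int) = x ↔ wcovB x (pre ++ [v]) = true := by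
        rw [wcovB_iff]
        constructor
        · intro h
          refine ⟨by simp; omega, fun p hp => ?_⟩
          have := (hchar' ((p : Int))).mp (by simpa using hflen.mp h p hp)
          exact this.2.2
        · intro h
          refine hflen.mpr fun p hp => ?_
          have := (hchar' ((p : Int))).mpr ⟨by omega, by omega, h.2 p hp⟩
          simpa using this
      simp only [wrapGo, if_pos hval, firstIdx]
      rw [← hmdef, ← hs']
      by_cases hfl : ((s'.length : Int) = x)
      · rw [if_pos ⟨by omega, hfl⟩, if_pos (hfull.mp hfl)]
      · rw [if_neg (fun h => hfl h.2), if_neg (fun h => hfl (hfull.mpr h))]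
        have := ih (pre ++ [v]) s' hnd' hchar' (by simp; omega) hfl
        simpa using this
    · have hchar2 : ∀ e : Int, e ∈ seen ↔ 0 ≤ e ∧ e < x ∧ ((e + 1) ∈ pre ++ [v] ∨ (e + 1 - x) ∈ pre ++ [v]) := by
        intro e
        rw [hchar e]
        simp only [List.mem_append, List.mem_singleton]
        constructor
        · rintro ⟨h1, h2, h3 | h3⟩
          · exact ⟨h1, h2, Or.inl (Or.inl h3)⟩
          · exact ⟨h1, h2, Or.inr (Or.inl h3)⟩
        · rintro ⟨h1, h2, (h3 | h3) | (h3 | h3)⟩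
          · exact ⟨h1, h2, Or.inl h3⟩
          · exact absurd h3 (by omega)
          · exact ⟨h1, h2, Or.inr h3⟩
          · exact absurd h3 (by omega)
      have hwfalse : ¬ wcovB x (pre ++ [v]) = true := by
        intro hw
        apply hne
        rw [covered_iff x 0 hx seen hnd hrange]
        intro p hp
        have := (hchar2 ((p : Int))).mpr ⟨by omega, by omega, ((wcovB_iff _ _).mp hw).2 p hp⟩
        simpa using this
      simp only [wrapGo, if_neg hval, firstIdx, if_neg hwfalse]
      have := ih (pre ++ [v]) seen hnd hchar2 (by simp; omega) hne
      simpa using this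

lemma altGo_eq_firstIdx (x : Int) (hx : 0 < x) : ∀ (rest pre : List Int) (seen : PySem.Set Int),
    seen.Nodup →
    (∀ e : Int, e ∈ seen ↔ 1 ≤ e ∧ e ≤ x ∧ e ∈ pre) →
    seen.length ≤ pre.length →
    (seen.length : Int) ≠ x →
    altGo x rest pre.length seen = firstIdx (tcovB x) pre rest := by
  intro rest
  induction rest with
  | nil => intro pre seen _ _ _ _; rfl
  | cons v rest ih =>
    intro pre seen hnd hchar hle hne
    have hrange : ∀ e ∈ seen, 1 ≤ e ∧ e < 1 + x := by
      intro e he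
      obtain ⟨h1, h2, _⟩ := (hchar e).mp he
      exact ⟨h1, by omega⟩
    by_cases hval : 1 ≤ v ∧ v ≤ x
    · set s' := PySem.Set.add seen v with hs'
      have hnd' : s'.Nodup := PySem.Set.nodup_add _ _ hnd
      have hlen' : s'.length ≤ seen.length + 1 := by
        rw [hs']; unfold PySem.Set.add; split_ifs <;> simp
      have hchar' : ∀ e : Int, e ∈ s' ↔ 1 ≤ e ∧ e ≤ x ∧ e ∈ pre ++ [v] := by
        intro e
        rw [hs', PySem.Set.mem_add, hchar e]
        simp only [List.mem_append, List.mem_singleton]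
        constructor
        · rintro (⟨h1, h2, h3⟩ | rfl)
          · exact ⟨h1, h2, Or.inl h3⟩
          · exact ⟨hval.1, hval.2, Or.inr rfl⟩
        · rintro ⟨h1, h2, h3 | h3⟩
          · exact Or.inl ⟨h1, h2, h3⟩
          · exact Or.inr h3
      have hrange' : ∀ e ∈ s', 1 ≤ e ∧ e < 1 + x := by
        intro e he
        obtain ⟨h1, h2, _⟩ := (hchar' e).mp he
        exact ⟨h1, by omega⟩
      have hlb : seen.length ≤ s'.length := by
        rw [hs']; unfold PySem.Set.add; split_ifs <;> simp
      have hflen := covered_iff x 1 hx s' hnd' hrange'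
      have hfull : (s'.length : Int) = x ↔ tcovB x (pre ++ [v]) = true := by
        rw [tcovB_iff]
        constructor
        · intro h
          refine ⟨by simp; omega, fun p hp => ?_⟩
          have hm := (hchar' ((1 : Int) + p)).mp (hflen.mp h p hp)
          have h3 := hm.2.2
          simpa [add_comm] using h3
        · intro h
          refine hflen.mpr fun p hp => ?_
          have := (hchar' ((p : Int) + 1)).mpr ⟨by omega, by omega, h.2 p hp⟩
          simpa [add_comm] using this
      simp only [altGo, if_pos hval, firstIdx]
      rw [← hs']
      by_cases hfl : ((s'.length : Int) = x)
      · rw [if_pos hfl, if_pos (hfull.mp hfl)]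
      · rw [if_neg hfl, if_neg (fun h => hfl (hfull.mpr h))]
        have := ih (pre ++ [v]) s' hnd' hchar' (by simp; omega) hfl
        simpa using this
    · have hchar2 : ∀ e : Int, e ∈ seen ↔ 1 ≤ e ∧ e ≤ x ∧ e ∈ pre ++ [v] := by
        intro e
        rw [hchar e]
        simp only [List.mem_append, List.mem_singleton]
        constructor
        · rintro ⟨h1, h2, h3⟩
          exact ⟨h1, h2, Or.inl h3⟩
        · rintro ⟨h1, h2, h3 | h3⟩
          · exact ⟨h1, h2, h3⟩
          · exact (hval ⟨by omega, by omega⟩).elim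
      have htfalse : ¬ tcovB x (pre ++ [v]) = true := by
        intro ht
        apply hne
        rw [covered_iff x 1 hx seen hnd hrange]
        intro p hp
        have := (hchar2 ((p : Int) + 1)).mpr ⟨by omega, by omega, ((tcovB_iff _ _).mp ht).2 p hp⟩
        simpa [add_comm] using this
      simp only [altGo, if_neg hval, firstIdx, if_neg htfalse]
      have := ih (pre ++ [v]) seen hnd hchar2 (by simp; omega) hne
      simpa using this

-- x ≤ 0: both programs return -1 (len(count) = 0, every index raises)
lemma pyOuter_nonpos (x : Int) (hx : x ≤ 0) : ∀ (rest : List Int) (i : Nat) (count : Nat → Int),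
    pyOuter x rest i count = -1 := by
  intro rest
  induction rest with
  | nil => intro i count; rfl
  | cons v rest ih =>
    intro i count
    have hz : x.toNat = 0 := by omega
    have hnone : PySem.List.pyIdx? x.toNat (v - 1) = none := by
      rw [hz]
      simp only [PySem.List.pyIdx?]
      split_ifs <;> first | rfl | omega
    simp only [pyOuter, hnone]
    exact ih (i + 1) count

lemma altGo_nonpos (x : Int) (hx : x ≤ 0) : ∀ (rest : List Int) (i : Nat) (seen : PySem.Set Int),
    altGo x rest i seen = -1 := by
  intro rest
  induction rest with
  | nil => intro i seen; rfl
  | cons v rest ih =>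
    intro i seen
    simp only [altGo]
    rw [if_neg (by intro ⟨h1, h2⟩; omega)]
    exact ih (i + 1) seen

-- characterization of firstIdx: either no full prefix and -1, or the minimal full prefix index
lemma firstIdx_spec (full : List Int → Bool) : ∀ (rest pre : List Int),
    (firstIdx full pre rest = -1 ∧ ∀ i, i < rest.length → ¬ full (pre ++ rest.take (i + 1)) = true)
    ∨ (∃ i, i < rest.length ∧ full (pre ++ rest.take (i + 1)) = true ∧
        (∀ j, j < i → ¬ full (pre ++ rest.take (j + 1)) = true) ∧
        firstIdx full pre rest = ((pre.length : Int) + (i : Int))) := by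
  intro rest
  induction rest with
  | nil =>
    intro pre
    left
    exact ⟨rfl, fun i hi => by simp at hi⟩
  | cons v rest ih =>
    intro pre
    by_cases hv : full (pre ++ [v]) = true
    · right
      refine ⟨0, by simp, by simpa using hv, fun j hj => by omega, ?_⟩
      simp [firstIdx, hv]
    · have heq : firstIdx full pre (v :: rest) = firstIdx full (pre ++ [v]) rest := by
        simp [firstIdx, hv]
      rcases ih (pre ++ [v]) with ⟨hval, hnone⟩ | ⟨i, hi, hfull, hmin, hval⟩
      · left
        refine ⟨heq.trans hval, fun i hi => ?_⟩
        match i with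
        | 0 => simpa using hv
        | i + 1 =>
          have := hnone i (by simpa using hi)
          simpa [List.append_assoc] using this
      · right
        refine ⟨i + 1, by simpa using hi, ?_, ?_, ?_⟩
        · simpa [List.append_assoc] using hfull
        · intro j hj
          match j with
          | 0 => simpa using hv
          | j + 1 =>
            have := hmin j (by omega)
            simpa [List.append_assoc] using this
        · rw [heq, hval]; simp; omega

-- reductions of the two ports to firstIdx (x > 0)
lemma solution_eq_firstIdx (x : Int) (hx : 0 < x) (a : List Int) :
    solution x a = firstIdx (wcovB x) [] a := by
  have h1 : solution x a = wrapGo x a 0 PySem.Set.empty := by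
    unfold solution
    apply go_eq
    · exact List.nodup_nil
    · intro e he; cases he
    · intro p h; simp
    · intro p h; simp [PySem.Set.empty]
  rw [h1]
  have h2 := wrapGo_eq_firstIdx x hx a [] PySem.Set.empty List.nodup_nil
    (by intro e; simp [PySem.Set.empty]) (by simp [PySem.Set.empty]) (by simp [PySem.Set.empty]; omega)
  simpa [PySem.Set.empty] using h2

lemma solution_alt_eq_firstIdx (x : Int) (hx : 0 < x) (a : List Int) :
    solution_alt x a = firstIdx (tcovB x) [] a := by
  have h2 := altGo_eq_firstIdx x hx a [] PySem.Set.empty List.nodup_nil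
    (by intro e; simp [PySem.Set.empty]) (by simp [PySem.Set.empty]) (by simp [PySem.Set.empty]; omega)
  simpa [solution_alt, PySem.Set.empty] using h2

-- ===== VERDICT (by name: the statements are the Claim_ definitions above) =====
theorem solution_spec : Claim_unchanged_solution := by
  intro x a _ hD
  by_cases hx : 0 < x
  · rw [solution_eq_firstIdx x hx a, solution_alt_eq_firstIdx x hx a]
    rcases firstIdx_spec (wcovB x) a [] with ⟨hWval, hWnone⟩ | ⟨i, hi, hw, hmin, hWval⟩
    · rcases firstIdx_spec (tcovB x) a [] with ⟨hTval, _⟩ | ⟨j, hj, ht, _, hTval⟩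
      · rw [hWval, hTval]
      · exact absurd (tcov_imp_wcov x _ ht) (hWnone j hj)
    · have ht : tcovB x (a.take (i + 1)) = true := by
        by_contra hnt
        exact hD ⟨hx, i, hi, fun j hj => by simpa using hmin j hj, by simpa using hw, hnt⟩
      rcases firstIdx_spec (tcovB x) a [] with ⟨_, hTnone⟩ | ⟨j, hj, htj, hminT, hTval⟩
      · exact absurd (by simpa using ht) (hTnone i hi)
      · have hij : i = j := by
          by_contra hne
          rcases Nat.lt_or_ge i j with hlt | hge
          · exact hminT i hlt (by simpa using ht)
          · exact hmin j (by omega) (tcov_imp_wcov x _ htj)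
        rw [hWval, hTval, hij]
  · unfold solution
    rw [pyOuter_nonpos x (by omega) a 0]
    unfold solution_alt
    rw [altGo_nonpos x (by omega) a 0 PySem.Set.empty]

theorem solution_changed : Claim_changed_solution := by
  unfold Claim_changed_solution; decide

theorem solution_tight : Claim_exact_solution := by
  intro x a _ hD
  rcases hD with ⟨hx, i, hi, hmin, hw, hnt⟩
  rw [solution_eq_firstIdx x hx a, solution_alt_eq_firstIdx x hx a]
  have hWval : firstIdx (wcovB x) [] a = ((i : Nat) : Int) := by
    rcases firstIdx_spec (wcovB x) a [] with ⟨_, hnone⟩ | ⟨i', hi', hw', hmin', hval⟩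
    · exact absurd (by simpa using hw) (hnone i hi)
    · have : i = i' := by
        by_contra hne
        rcases Nat.lt_or_ge i i' with hlt | hge
        · exact hmin' i hlt (by simpa using hw)
        · exact hmin i' (by omega) (by simpa using hw')
      rw [hval, this]; simp
  rw [hWval]
  rcases firstIdx_spec (tcovB x) a [] with ⟨hTval, _⟩ | ⟨j, hj, htj, hminT, hTval⟩
  · rw [hTval]; omega
  · rw [hTval]
    have hji : j ≠ i := by
      intro h; subst h
      exact hnt (by simpa using htj)
    have hij : ¬ j < i := fun hlt => hmin j hlt (tcov_imp_wcov x _ (by simpa using htj))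
    simp; omega
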